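-- pv_equiv track=rewrite | github.com/krump3t/ESG_scoring | agents/scoring/rubric_scorer.py | _extract_frameworks
-- ===== SOURCE A (Python) =====
-- from typing import Dict, List, Any, Optional
--
-- def _extract_frameworks(evidence: List[Dict[str, Any]]) -> List[str]:
--     """Extract frameworks mentioned in evidence."""
--     frameworks = set()
--
--     framework_keywords = {
--         "TCFD": ["TCFD", "Task Force on Climate"],
--         "GRI": ["GRI", "Global Reporting Initiative"],
--         "SASB": ["SASB"],
--         "CDP": ["CDP"],
--         "SBTi": ["SBTi", "Science Based Targets"],
--         "GHG Protocol": ["GHG Protocol"],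
--         "RE100": ["RE100"],
--         "ISO 14001": ["ISO 14001"],
--         "ISSB": ["ISSB"]
--     }
--
--     for ev in evidence:
--         text = ev.get("extract_30w", "").lower()
--         for framework, keywords in framework_keywords.items():
--             if any(kw.lower() in text for kw in keywords):
--                 frameworks.add(framework)
--
--     return sorted(list(frameworks))
-- ===== SOURCE B (Python) =====
-- # Different decomposition: join all lowered evidence texts into ONE
-- # newline-separated corpus, then make a single pass over a pre-sorted,
-- # pre-lowered keyword table, appending matches in order (no set, no sort).
-- # Correct because no keyword contains a newline, so a keyword occurs in the
-- # corpus iff it occurs in some individual text.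
-- _FRAMEWORK_TABLE = [
--     ("CDP", ("cdp",)),
--     ("GHG Protocol", ("ghg protocol",)),
--     ("GRI", ("gri", "global reporting initiative")),
--     ("ISO 14001", ("iso 14001",)),
--     ("ISSB", ("issb",)),
--     ("RE100", ("re100",)),
--     ("SASB", ("sasb",)),
--     ("SBTi", ("sbti", "science based targets")),
--     ("TCFD", ("tcfd", "task force on climate")),
-- ]
--
-- def _extract_frameworks(evidence):
--     corpus = "\n".join(ev.get("extract_30w", "").lower() for ev in evidence)
--     out = []
--     for fw, kws in _FRAMEWORK_TABLE:
--         if any(kw in corpus for kw in kws):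
--             out.append(fw)
--     return out
-- ===== Notes on version B (the rewrite author's own statement) =====
-- stated objective: alternative
-- what changed: A runs a nested evidence-outer/framework-inner scan accumulating a set which it finally sorts; B first joins all lowered evidence texts into one newline-separated corpus and then makes a single pass over a pre-sorted pre-lowered keyword table, emitting matches already in sorted order with no set and no sort (sound because no keyword contains a newline).
import Mathlib
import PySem

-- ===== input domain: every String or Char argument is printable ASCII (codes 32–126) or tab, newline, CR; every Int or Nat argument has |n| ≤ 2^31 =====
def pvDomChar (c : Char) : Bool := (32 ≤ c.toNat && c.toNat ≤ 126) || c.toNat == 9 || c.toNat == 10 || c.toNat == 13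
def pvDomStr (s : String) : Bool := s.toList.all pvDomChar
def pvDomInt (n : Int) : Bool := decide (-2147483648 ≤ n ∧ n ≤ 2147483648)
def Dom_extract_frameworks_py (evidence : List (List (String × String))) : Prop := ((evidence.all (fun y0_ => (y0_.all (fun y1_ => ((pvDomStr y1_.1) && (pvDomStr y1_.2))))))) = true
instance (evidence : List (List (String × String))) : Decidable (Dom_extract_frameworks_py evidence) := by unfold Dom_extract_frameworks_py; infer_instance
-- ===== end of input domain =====

-- B replaces A's nested evidence×framework set-accumulate-then-sort scan by: join all
-- lowered texts into one newline-separated corpus, then one pass over a pre-sorted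
-- pre-lowered keyword table, emitting the result already sorted (no keyword contains '\n').

-- ===== PORT A =====
def pyFrameworkKeywords : PySem.Dict String (List String) :=
  PySem.Dict.ofList
    [("TCFD", ["TCFD", "Task Force on Climate"]),
     ("GRI", ["GRI", "Global Reporting Initiative"]),
     ("SASB", ["SASB"]),
     ("CDP", ["CDP"]),
     ("SBTi", ["SBTi", "Science Based Targets"]),
     ("GHG Protocol", ["GHG Protocol"]),
     ("RE100", ["RE100"]),
     ("ISO 14001", ["ISO 14001"]),
     ("ISSB", ["ISSB"])]

def extract_frameworks_py (evidence : List (List (String × String))) : List String :=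
  let frameworks : PySem.Set String := PySem.Set.empty
  let frameworks := evidence.foldl (fun fws ev =>
    let text := PySem.Str.lower (PySem.Dict.getD (PySem.Dict.mk ev) "extract_30w" "")
    (PySem.Dict.items pyFrameworkKeywords).foldl (fun fws p =>
      if p.2.any (fun kw => PySem.Str.isIn (PySem.Str.lower kw) text) then PySem.Set.add fws p.1
      else fws) fws) frameworks
  PySem.List.sorted frameworks (fun x => x) false

-- ===== PORT B =====
def altTable : List (String × List String) :=
  [("CDP", ["cdp"]),
   ("GHG Protocol", ["ghg protocol"]),
   ("GRI", ["gri", "global reporting initiative"]),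
   ("ISO 14001", ["iso 14001"]),
   ("ISSB", ["issb"]),
   ("RE100", ["re100"]),
   ("SASB", ["sasb"]),
   ("SBTi", ["sbti", "science based targets"]),
   ("TCFD", ["tcfd", "task force on climate"])]

-- the 'for fw, kws in _FRAMEWORK_TABLE: if any(...): out.append(fw)' loop of Source B
def pvScan (corpus : String) : List (String × List String) → List String
  | [] => []
  | p :: rest =>
      if p.2.any (fun kw => PySem.Str.isIn kw corpus) then p.1 :: pvScan corpus rest
      else pvScan corpus rest

def extract_frameworks_py_alt (evidence : List (List (String × String))) : List String :=
  let corpus := PySem.Str.join "\n"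
    (evidence.map (fun ev => PySem.Str.lower (PySem.Dict.getD (PySem.Dict.mk ev) "extract_30w" "")))
  pvScan corpus altTable

-- ===== PRECONDITION & SPEC =====
def Spec_extract_frameworks_py (evidence : List (List (String × String))) (out : List String) : Prop := out = extract_frameworks_py_alt evidence
instance (evidence : List (List (String × String))) (out : List String) : Decidable (Spec_extract_frameworks_py evidence out) := by unfold Spec_extract_frameworks_py; infer_instance

-- ===== CLAIM =====
def Claim_equal_extract_frameworks_py : Prop := ∀ (evidence : List (List (String × String))), Dom_extract_frameworks_py evidence → Spec_extract_frameworks_py evidence (extract_frameworks_py evidence)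

-- ===== LEMMAS AND PROOFS =====

-- A's per-evidence-item inner loop over the table
def pvInner (text : String) (fws : PySem.Set String) : PySem.Set String :=
  (PySem.Dict.items pyFrameworkKeywords).foldl (fun fws p =>
    if p.2.any (fun kw => PySem.Str.isIn (PySem.Str.lower kw) text) then PySem.Set.add fws p.1
    else fws) fws

theorem pv_foldl_add_mem {c : String × List String → Bool} (L : List (String × List String))
    (s : PySem.Set String) (x : String) :
    (x ∈ L.foldl (fun s p => if c p then PySem.Set.add s p.1 else s) s) ↔
      x ∈ s ∨ ∃ p ∈ L, p.1 = x ∧ c p = true := by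
  induction L generalizing s with
  | nil => simp
  | cons h t ih =>
    simp only [List.foldl_cons, ih, List.mem_cons]
    by_cases hc : c h = true
    · rw [if_pos hc]
      simp only [PySem.Set.mem_add]
      constructor
      · rintro (⟨h1 | h1⟩ | ⟨p, hp, h2, h3⟩)
        · exact Or.inl h1
        · exact Or.inr ⟨h, Or.inl rfl, h1.symm, hc⟩
        · exact Or.inr ⟨p, Or.inr hp, h2, h3⟩
      · rintro (h1 | ⟨p, (rfl | hp), h2, h3⟩)
        · exact Or.inl (Or.inl h1)
        · exact Or.inl (Or.inr h2.symm)
        · exact Or.inr ⟨p, hp, h2, h3⟩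
    · rw [if_neg hc]
      constructor
      · rintro (h1 | ⟨p, hp, h2, h3⟩)
        · exact Or.inl h1
        · exact Or.inr ⟨p, Or.inr hp, h2, h3⟩
      · rintro (h1 | ⟨p, (rfl | hp), h2, h3⟩)
        · exact Or.inl h1
        · exact absurd h3 hc
        · exact Or.inr ⟨p, hp, h2, h3⟩

theorem pv_foldl_add_nodup {c : String × List String → Bool} (L : List (String × List String))
    (s : PySem.Set String) (hs : s.Nodup) :
    (L.foldl (fun s p => if c p then PySem.Set.add s p.1 else s) s).Nodup := by
  induction L generalizing s with
  | nil => simpa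
  | cons h t ih =>
    simp only [List.foldl_cons]
    split_ifs with hc
    · exact ih _ (PySem.Set.nodup_add _ _ hs)
    · exact ih _ hs

theorem pv_outer_mem (evidence : List (List (String × String))) (s : PySem.Set String)
    (x : String) :
    (x ∈ evidence.foldl (fun fws ev => pvInner (PySem.Str.lower (PySem.Dict.getD (PySem.Dict.mk ev) "extract_30w" "")) fws) s) ↔
      x ∈ s ∨ ∃ ev ∈ evidence, ∃ p ∈ PySem.Dict.items pyFrameworkKeywords, p.1 = x ∧
        (p.2.any (fun kw => PySem.Str.isIn (PySem.Str.lower kw) (PySem.Str.lower (PySem.Dict.getD (PySem.Dict.mk ev) "extract_30w" "")))) = true := by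
  induction evidence generalizing s with
  | nil => simp
  | cons ev t ih =>
    rw [List.foldl_cons, ih]
    unfold pvInner
    rw [pv_foldl_add_mem]
    simp only [List.mem_cons]
    constructor
    · rintro (⟨h1 | ⟨p, hp, h2, h3⟩⟩ | ⟨e, he, p, hp, h2, h3⟩)
      · tauto
      · exact Or.inr ⟨ev, Or.inl rfl, p, hp, h2, h3⟩
      · exact Or.inr ⟨e, Or.inr he, p, hp, h2, h3⟩
    · rintro (h1 | ⟨e, (rfl | he), p, hp, h2, h3⟩)
      · tauto
      · exact Or.inl (Or.inr ⟨p, hp, h2, h3⟩)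
      · exact Or.inr ⟨e, he, p, hp, h2, h3⟩

theorem pv_outer_nodup (evidence : List (List (String × String))) (s : PySem.Set String)
    (hs : s.Nodup) :
    (evidence.foldl (fun fws ev => pvInner (PySem.Str.lower (PySem.Dict.getD (PySem.Dict.mk ev) "extract_30w" "")) fws) s).Nodup := by
  induction evidence generalizing s with
  | nil => simpa
  | cons ev t ih => exact ih _ (pv_foldl_add_nodup _ _ hs)

-- lowering A's keyword table gives a permutation of B's table
theorem pv_tables_perm :
    ((PySem.Dict.items pyFrameworkKeywords).map (fun p => (p.1, p.2.map PySem.Str.lower))).Perm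
      altTable := by decide

theorem pv_keys_sorted : (altTable.map Prod.fst).Pairwise (fun a b : String => a < b) := by
  have h : (altTable.map Prod.fst).Pairwise
      (fun a b : String => a.toList < b.toList) := by decide
  exact h.imp (fun hab => String.lt_iff_toList_lt.mpr hab)

theorem pv_keys_nodup : (altTable.map Prod.fst).Nodup := by decide

theorem pv_kws_ok : ∀ p ∈ altTable, ∀ kw ∈ p.2, kw.toList ≠ [] ∧ '\n' ∉ kw.toList := by decide

-- a prefix avoiding the separator stops before it
theorem pv_prefix_split {kw : List Char} {c : Char} (hc : c ∉ kw) :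
    ∀ {u v : List Char}, kw <+: u ++ c :: v → kw <+: u := by
  induction kw with
  | nil => intro u v _; exact List.nil_prefix
  | cons k kt ih =>
    intro u v h
    cases u with
    | nil =>
      obtain ⟨t, ht⟩ := h
      simp only [List.cons_append, List.nil_append, List.cons.injEq] at ht
      exact absurd (ht.1 ▸ List.mem_cons_self) hc
    | cons x u' =>
      rw [List.cons_append] at h
      obtain ⟨h1, h2⟩ := List.cons_prefix_cons.mp h
      subst h1
      exact List.cons_prefix_cons.mpr ⟨rfl, ih (fun hm => hc (List.mem_cons_of_mem _ hm)) h2⟩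

-- an infix avoiding the separator lies entirely on one side of it
theorem pv_infix_split {kw : List Char} {c : Char} (hc : c ∉ kw) :
    ∀ {u v : List Char}, kw <:+: u ++ c :: v → kw <:+: u ∨ kw <:+: v := by
  intro u
  induction u with
  | nil =>
    intro v h
    rcases List.infix_cons_iff.mp h with hp | hi
    · exact Or.inl (pv_prefix_split hc (u := []) hp).isInfix
    · exact Or.inr hi
  | cons x u' ih =>
    intro v h
    rw [List.cons_append] at h
    rcases List.infix_cons_iff.mp h with hp | hi
    · exact Or.inl (pv_prefix_split hc (by simpa using hp)).isInfix
    · rcases ih hi with h1 | h2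
      · exact Or.inl (h1.trans (List.suffix_cons x u').isInfix)
      · exact Or.inr h2

-- a nonempty newline-free word is in the joined corpus iff it is in some part
theorem pv_infix_join (kw : List Char) (hne : kw ≠ []) (hc : '\n' ∉ kw) :
    ∀ (ts : List (List Char)), (kw <:+: PySem.Chars.join ['\n'] ts) ↔ ∃ t ∈ ts, kw <:+: t
  | [] => by
      simp [PySem.Chars.join, List.intercalate, hne]
  | [t] => by
      simp [PySem.Chars.join_singleton]
  | t :: t2 :: rest => by
      rw [PySem.Chars.join_cons_cons]
      constructor
      · intro h
        rw [List.append_assoc] at h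
        rcases pv_infix_split hc (by simpa using h) with h1 | h2
        · exact ⟨t, List.mem_cons_self, h1⟩
        · obtain ⟨t', ht', h3⟩ := (pv_infix_join kw hne hc (t2 :: rest)).mp h2
          exact ⟨t', List.mem_cons_of_mem _ ht', h3⟩
      · rintro ⟨t', ht', h3⟩
        rcases List.mem_cons.mp ht' with rfl | ht'
        · refine h3.trans ?_
          rw [List.append_assoc]
          exact (List.prefix_append _ _).isInfix
        · have h4 := (pv_infix_join kw hne hc (t2 :: rest)).mpr ⟨t', ht', h3⟩
          exact h4.trans (List.suffix_append _ _).isInfix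

theorem pv_str_isIn_join (kw : String) (hne : kw.toList ≠ []) (hc : '\n' ∉ kw.toList)
    (texts : List String) :
    PySem.Str.isIn kw (PySem.Str.join "\n" texts) = true ↔
      ∃ t ∈ texts, PySem.Str.isIn kw t = true := by
  rw [PySem.Str.isIn_iff_infix, PySem.Str.toList_join]
  have hsep : ("\n" : String).toList = ['\n'] := by decide
  rw [hsep, pv_infix_join kw.toList hne hc]
  constructor
  · rintro ⟨t, ht, h3⟩
    obtain ⟨t0, ht0, rfl⟩ := List.mem_map.1 ht
    exact ⟨t0, ht0, (PySem.Str.isIn_iff_infix _ _).mpr h3⟩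
  · rintro ⟨t0, ht0, h3⟩
    exact ⟨t0.toList, List.mem_map.2 ⟨t0, ht0, rfl⟩, (PySem.Str.isIn_iff_infix _ _).mp h3⟩

theorem pvScan_mem (corpus : String) (L : List (String × List String)) (x : String) :
    x ∈ pvScan corpus L ↔
      ∃ p ∈ L, p.1 = x ∧ (p.2.any (fun kw => PySem.Str.isIn kw corpus)) = true := by
  induction L with
  | nil => simp [pvScan]
  | cons h t ih =>
    simp only [pvScan]
    split_ifs with hc
    · simp only [List.mem_cons, ih]
      constructor
      · rintro (rfl | ⟨p, hp, h2, h3⟩)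
        · exact ⟨h, Or.inl rfl, rfl, hc⟩
        · exact ⟨p, Or.inr hp, h2, h3⟩
      · rintro ⟨p, (rfl | hp), h2, h3⟩
        · exact Or.inl h2.symm
        · exact Or.inr ⟨p, hp, h2, h3⟩
    · rw [ih]
      constructor
      · rintro ⟨p, hp, h2, h3⟩
        exact ⟨p, List.mem_cons_of_mem _ hp, h2, h3⟩
      · rintro ⟨p, hp, h2, h3⟩
        rcases List.mem_cons.mp hp with rfl | hp
        · exact absurd h3 hc
        · exact ⟨p, hp, h2, h3⟩

theorem pvScan_sublist (corpus : String) (L : List (String × List String)) :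
    (pvScan corpus L).Sublist (L.map Prod.fst) := by
  induction L with
  | nil => simp [pvScan]
  | cons h t ih =>
    simp only [pvScan, List.map_cons]
    split_ifs with hc
    · exact ih.cons₂ _
    · exact ih.cons _

-- ===== VERDICT =====
theorem extract_frameworks_py_spec : Claim_equal_extract_frameworks_py := by
  intro evidence _
  unfold Spec_extract_frameworks_py
  show extract_frameworks_py evidence = extract_frameworks_py_alt evidence
  unfold extract_frameworks_py extract_frameworks_py_alt
  simp only []
  set texts := evidence.map (fun ev => PySem.Str.lower (PySem.Dict.getD (PySem.Dict.mk ev) "extract_30w" "")) with htexts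
  set corpus := PySem.Str.join "\n" texts with hcorpus
  set S := evidence.foldl (fun fws ev => pvInner (PySem.Str.lower (PySem.Dict.getD (PySem.Dict.mk ev) "extract_30w" "")) fws) PySem.Set.empty with hS
  have hfold : (evidence.foldl (fun fws ev =>
      (PySem.Dict.items pyFrameworkKeywords).foldl (fun fws p =>
        if p.2.any (fun kw => PySem.Str.isIn (PySem.Str.lower kw) (PySem.Str.lower (PySem.Dict.getD (PySem.Dict.mk ev) "extract_30w" ""))) then PySem.Set.add fws p.1
        else fws) fws) PySem.Set.empty) = S := rfl
  rw [hfold]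
  set ys := pvScan corpus altTable with hys
  have hsub : ys.Sublist (altTable.map Prod.fst) := pvScan_sublist corpus altTable
  have hpw : ys.Pairwise (fun a b : String => a < b) := pv_keys_sorted.sublist hsub
  have hynd : ys.Nodup := pv_keys_nodup.sublist hsub
  have hSnd : S.Nodup := pv_outer_nodup evidence PySem.Set.empty (by simp [PySem.Set.empty])
  have hmem : ∀ x, x ∈ ys ↔ x ∈ S := by
    intro x
    rw [hS, pv_outer_mem]
    simp only [PySem.Set.empty, List.not_mem_nil, false_or]
    rw [hys, pvScan_mem]
    constructor
    · rintro ⟨p, hp, rfl, hany⟩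
      obtain ⟨kw, hkw, hin⟩ := List.any_eq_true.1 hany
      obtain ⟨hne, hnl⟩ := pv_kws_ok p hp kw hkw
      obtain ⟨text, htext, hin'⟩ := (pv_str_isIn_join kw hne hnl texts).mp hin
      obtain ⟨ev, hev, rfl⟩ := List.mem_map.1 htext
      obtain ⟨q, hq, hqe⟩ := List.mem_map.1 (pv_tables_perm.mem_iff.2 hp)
      obtain ⟨kw0, hkw0, rfl⟩ := List.mem_map.1 (by rw [← hqe] at hkw; exact hkw)
      refine ⟨ev, hev, q, hq, ?_, ?_⟩
      · rw [← hqe]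
      · exact List.any_eq_true.2 ⟨kw0, hkw0, hin'⟩
    · rintro ⟨ev, hev, q, hq, hqx, hk⟩
      obtain ⟨kw0, hkw0, hin0⟩ := List.any_eq_true.1 hk
      have hpmem : (q.1, q.2.map PySem.Str.lower) ∈ altTable :=
        pv_tables_perm.mem_iff.1 (List.mem_map.2 ⟨q, hq, rfl⟩)
      have hkwmem : PySem.Str.lower kw0 ∈ q.2.map PySem.Str.lower :=
        List.mem_map.2 ⟨kw0, hkw0, rfl⟩
      obtain ⟨hne, hnl⟩ := pv_kws_ok _ hpmem _ hkwmem
      refine ⟨(q.1, q.2.map PySem.Str.lower), hpmem, hqx, ?_⟩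
      refine List.any_eq_true.2 ⟨PySem.Str.lower kw0, hkwmem, ?_⟩
      exact (pv_str_isIn_join _ hne hnl texts).mpr
        ⟨PySem.Str.lower (PySem.Dict.getD (PySem.Dict.mk ev) "extract_30w" ""),
         List.mem_map.2 ⟨ev, hev, rfl⟩, hin0⟩
  have hperm : ys.Perm S := (List.perm_ext_iff_of_nodup hynd hSnd).2 hmem
  exact PySem.List.sorted_eq_of_perm_of_pairwise_lt S ys (fun x => x) hperm hpw
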